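-- pv_equiv track=rewrite | github.com/eliottcassidy2000/math | 04-computation/matching_cycle_duality.py | enumerate_perfect_matchings
-- ===== SOURCE A (Python) =====
-- def enumerate_perfect_matchings(A, n, v_del=None):
--     """Enumerate all perfect matchings of T\{v_del} with their signs.
--     A matching is a set of n/2 disjoint edges covering all vertices except v_del.
--     The sign comes from the Pfaffian convention."""
--     if v_del is not None:
--         vertices = [i for i in range(n) if i != v_del]
--     else:
--         vertices = list(range(n))
--     k = len(vertices)
--     if k % 2 == 1:
--         return []  # No PMs for odd vertex count
--
--     S = [[A[i][j] - A[j][i] for j in range(n)] for i in range(n)]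
--
--     # Enumerate all perfect matchings by recursive pairing
--     matchings = []
--
--     def find_pms(remaining, current_matching):
--         if not remaining:
--             matchings.append(current_matching[:])
--             return
--         first = remaining[0]
--         for i in range(1, len(remaining)):
--             partner = remaining[i]
--             current_matching.append((first, partner))
--             new_remaining = remaining[1:i] + remaining[i+1:]
--             find_pms(new_remaining, current_matching)
--             current_matching.pop()
--
--     find_pms(vertices, [])
--
--     # Compute signed weight for each matching
--     results = []
--     for pm in matchings:
--         # Weight = product of S[i][j] for each edge (i,j) in the matching
--         weight = 1
--         for i, j in pm:
--             weight *= S[i][j]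
--
--         # Pfaffian sign: the matching defines a permutation
--         # sigma = (pm[0][0], pm[0][1], pm[1][0], pm[1][1], ...)
--         # The sign of this permutation relative to the identity gives the Pf sign
--         perm_list = []
--         for i, j in pm:
--             perm_list.extend([i, j])
--         # Count inversions
--         inv = sum(1 for a2 in range(len(perm_list)) for b2 in range(a2+1, len(perm_list))
--                   if perm_list[a2] > perm_list[b2])
--         pf_sign = (-1) ** inv
--
--         results.append((pm, weight, pf_sign, pf_sign * weight))
--
--     return results
-- ===== SOURCE B (Python) =====
-- def enumerate_perfect_matchings(A, n, v_del=None):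
--     """Same enumeration, but fused: weight and Pfaffian sign are accumulated
--     during the pairing recursion (sign via (-1)^idx per chosen partner),
--     so the per-matching inversion recount disappears."""
--     if v_del is not None:
--         vertices = [i for i in range(n) if i != v_del]
--     else:
--         vertices = list(range(n))
--     if len(vertices) % 2 == 1:
--         return []
--
--     def go(remaining, edges, weight, sign):
--         if not remaining:
--             return [(edges, weight, sign, sign * weight)]
--         first, rest = remaining[0], remaining[1:]
--         out = []
--         seen = []
--         sgn = 1
--         for k in range(len(rest)):
--             partner = rest[k]
--             w = A[first][partner] - A[partner][first]
--             out += go(seen + rest[k + 1:], edges + [(first, partner)],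
--                       weight * w, sign * sgn)
--             seen.append(partner)
--             sgn = -sgn
--         return out
--
--     return go(vertices, [], 1, 1)
-- ===== Notes on version B (the rewrite author's own statement) =====
-- stated objective: alternative
-- what changed: B fuses enumeration and scoring into one recursion that accumulates the edge weight and the Pfaffian sign incrementally (factor (-1)^idx per chosen partner) instead of A's two-phase enumerate-then-rescan with an O(k^2) inversion count per matching; B also reads A[i][j] entries on demand instead of materialising the full antisymmetrised n*n matrix S.
import Mathlib
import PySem

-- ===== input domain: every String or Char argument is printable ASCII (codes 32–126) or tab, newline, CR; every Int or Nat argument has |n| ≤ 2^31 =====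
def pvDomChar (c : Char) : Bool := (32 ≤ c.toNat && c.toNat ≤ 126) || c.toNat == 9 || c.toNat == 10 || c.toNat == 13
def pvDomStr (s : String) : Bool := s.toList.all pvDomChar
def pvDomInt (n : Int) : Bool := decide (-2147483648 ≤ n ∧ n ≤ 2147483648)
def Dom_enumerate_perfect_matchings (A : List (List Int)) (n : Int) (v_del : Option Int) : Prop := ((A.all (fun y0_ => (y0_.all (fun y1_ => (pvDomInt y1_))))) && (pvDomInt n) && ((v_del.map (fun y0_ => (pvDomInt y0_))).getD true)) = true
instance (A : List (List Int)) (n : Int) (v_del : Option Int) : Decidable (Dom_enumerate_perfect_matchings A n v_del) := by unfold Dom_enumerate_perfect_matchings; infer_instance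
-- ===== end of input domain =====

-- B fuses A's enumerate-then-score pipeline into one recursion that tracks weight and
-- Pfaffian sign incrementally ((-1)^idx per chosen partner); alternative decomposition, not claimed faster.

-- ===== PORT A =====

-- A[i][j] (total form of the Python indexing; the defaults are reached only outside Pre_)
def pvIdx2 (M : List (List Int)) (i j : Int) : Int :=
  PySem.List.pyGetD (PySem.List.pyGetD M i []) j 0

-- find_pms: the fuel only makes the recursion total; it is never exhausted on the actual call
def pvFindPms (fuel : Nat) (remaining : List Int) (current : List (Int × Int)) :
    List (List (Int × Int)) :=
  match fuel with
  | 0 => []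
  | fuel + 1 =>
    match remaining with
    | [] => [current]
    | first :: _ =>
      (PySem.List.pyRange 1 (remaining.length : Int) 1).flatMap (fun i =>
        let partner := PySem.List.pyGetD remaining i 0
        let new_remaining :=
          PySem.List.slice remaining (some 1) (some i) ++
          PySem.List.slice remaining (some (i + 1)) (some (remaining.length : Int))
        pvFindPms fuel new_remaining (current ++ [(first, partner)]))

-- the body of A's results loop: weight, perm_list, inversion count, sign
def pvScore (S : List (List Int)) (pm : List (Int × Int)) :
    (List (Int × Int)) × Int × Int × Int :=
  let weight := pm.foldl (fun acc e => acc * pvIdx2 S e.1 e.2) 1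
  let perm_list := pm.foldl (fun acc e => acc ++ [e.1, e.2]) ([] : List Int)
  let L := perm_list.length
  let inv := (List.range L).foldl (fun acc a2 =>
      acc + ((List.range' (a2 + 1) (L - (a2 + 1))).filter
        (fun b2 => decide (perm_list.getD b2 0 < perm_list.getD a2 0))).length) 0
  let pf_sign : Int := (-1) ^ inv
  (pm, weight, pf_sign, pf_sign * weight)

def enumerate_perfect_matchings (A : List (List Int)) (n : Int) (v_del : Option Int) :
    List ((List (Int × Int)) × Int × Int × Int) :=
  let vertices :=
    match v_del with
    | some v => (PySem.List.pyRange 0 n 1).filter (fun i => decide (i ≠ v))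
    | none => PySem.List.pyRange 0 n 1
  let k := vertices.length
  if k % 2 = 1 then []
  else
    let S := (PySem.List.pyRange 0 n 1).map (fun i =>
      (PySem.List.pyRange 0 n 1).map (fun j => pvIdx2 A i j - pvIdx2 A j i))
    (pvFindPms (k + 1) vertices []).map (pvScore S)

-- ===== PORT B =====

-- the for-loop over the remaining partners of Source B's go (seen = rest[:k], todo = rest[k:]);
-- `go` is the recursive call at the next depth
def pvForLoop (M : List (List Int))
    (go : List Int → List (Int × Int) → Int → Int → List ((List (Int × Int)) × Int × Int × Int))
    (first : Int) :
    List Int → List Int → List (Int × Int) → Int → Int → Int →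
      List ((List (Int × Int)) × Int × Int × Int)
  | _, [], _, _, _, _ => []
  | seen, partner :: todo', edges, weight, sign, sgn =>
    go (seen ++ todo') (edges ++ [(first, partner)])
      (weight * (pvIdx2 M first partner - pvIdx2 M partner first)) (sign * sgn) ++
    pvForLoop M go first (seen ++ [partner]) todo' edges weight sign (-sgn)

-- go(remaining, edges, weight, sign) of Source B (fuel = totality guard only)
def pvGo (M : List (List Int)) : Nat → List Int → List (Int × Int) → Int → Int →
    List ((List (Int × Int)) × Int × Int × Int)
  | 0, _, _, _, _ => []
  | fuel + 1, remaining, edges, weight, sign =>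
    match remaining with
    | [] => [(edges, weight, sign, sign * weight)]
    | first :: rest => pvForLoop M (pvGo M fuel) first [] rest edges weight sign 1

def enumerate_perfect_matchings_alt (A : List (List Int)) (n : Int) (v_del : Option Int) :
    List ((List (Int × Int)) × Int × Int × Int) :=
  let vertices :=
    match v_del with
    | some v => (PySem.List.pyRange 0 n 1).filter (fun i => decide (i ≠ v))
    | none => PySem.List.pyRange 0 n 1
  if vertices.length % 2 = 1 then []
  else pvGo A (vertices.length + 1) vertices [] 1 1

-- ===== PRECONDITION & SPEC =====

-- Pre_ excludes exactly the inputs where the Python A raises IndexError while building the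
-- n×n matrix S: an even vertex count together with A having fewer than n rows or a row
-- shorter than n. On every other input A returns normally.
def Pre_enumerate_perfect_matchings (A : List (List Int)) (n : Int) (v_del : Option Int) : Prop :=
  (n.toNat - (match v_del with
    | some v => if 0 ≤ v ∧ v < n then 1 else 0
    | none => 0)) % 2 = 1
  ∨ (n.toNat ≤ A.length ∧ ∀ row ∈ A.take n.toNat, n.toNat ≤ row.length)

instance (A : List (List Int)) (n : Int) (v_del : Option Int) :
    Decidable (Pre_enumerate_perfect_matchings A n v_del) := by
  unfold Pre_enumerate_perfect_matchings; infer_instance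

def pvWitness_enumerate_perfect_matchings : List (List Int) × Int × Option Int :=
  ([[0, 1], [-1, 0]], 2, none)

def Spec_enumerate_perfect_matchings (A : List (List Int)) (n : Int) (v_del : Option Int)
    (out : List ((List (Int × Int)) × Int × Int × Int)) : Prop :=
  out = enumerate_perfect_matchings_alt A n v_del

instance (A : List (List Int)) (n : Int) (v_del : Option Int)
    (out : List ((List (Int × Int)) × Int × Int × Int)) :
    Decidable (Spec_enumerate_perfect_matchings A n v_del out) := by
  unfold Spec_enumerate_perfect_matchings; infer_instance

-- ===== CLAIM (what is proved, stated in full; the proofs are below) =====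
def Claim_equal_enumerate_perfect_matchings : Prop :=
  ∀ (A : List (List Int)) (n : Int) (v_del : Option Int),
    Dom_enumerate_perfect_matchings A n v_del →
    Pre_enumerate_perfect_matchings A n v_del →
    Spec_enumerate_perfect_matchings A n v_del (enumerate_perfect_matchings A n v_del)

-- ===== LEMMAS AND PROOFS =====

-- proof-side: all ways to pick one partner out of todo, with the prefix seen kept,
-- recording (partner, remaining-without-partner) and the partner's index
def picksI : List Int → List Int → List ((Int × List Int) × Nat)
  | _, [] => []
  | seen, p :: t => ((p, seen ++ t), seen.length) :: picksI (seen ++ [p]) t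

-- structural inversion count
def invList : List Int → Nat
  | [] => 0
  | x :: l => l.countP (fun y => decide (y < x)) + invList l

def permFlat (pm : List (Int × Int)) : List Int := pm.flatMap (fun e => [e.1, e.2])

-- prefixing a result of the fused recursion
def pvShift (edges : List (Int × Int)) (w s : Int)
    (r : (List (Int × Int)) × Int × Int × Int) :
    (List (Int × Int)) × Int × Int × Int :=
  (edges ++ r.1, w * r.2.1, s * r.2.2.1, s * r.2.2.1 * (w * r.2.1))

theorem pvFindPms_shift (fuel : Nat) :
    ∀ (remaining : List Int) (c d : List (Int × Int)),
      pvFindPms fuel remaining (d ++ c) =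
        (pvFindPms fuel remaining c).map (fun m => d ++ m) := by
  induction fuel with
  | zero => intro r c d; simp [pvFindPms]
  | succ fuel ih =>
    intro r c d
    cases r with
    | nil => simp [pvFindPms]
    | cons f rest =>
      simp only [pvFindPms, List.map_flatMap]
      apply List.flatMap_congr
      intro i _
      rw [List.append_assoc]
      exact ih _ _ _

theorem pvFindPms_prefix (fuel : Nat) (remaining : List Int) (current : List (Int × Int)) :
    pvFindPms fuel remaining current =
      (pvFindPms fuel remaining []).map (fun m => current ++ m) := by
  have h := pvFindPms_shift fuel remaining [] current
  simpa using h

theorem rangeFlat {α : Type} (F : Int → List Int → List α) :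
    ∀ (t seen : List Int),
      (List.range t.length).flatMap
        (fun j => F (t.getD j 0) (seen ++ (t.take j ++ t.drop (j + 1))))
      = (picksI seen t).flatMap (fun x => F x.1.1 x.1.2) := by
  intro t
  induction t with
  | nil => intro seen; simp [picksI]
  | cons p t ih =>
    intro seen
    rw [List.length_cons, List.range_succ_eq_map, picksI]
    simp only [List.flatMap_cons, List.flatMap_map, Nat.succ_eq_add_one,
      List.getD_cons_zero, List.getD_cons_succ, List.take_zero, List.take_succ_cons,
      List.drop_succ_cons, List.drop_zero, List.nil_append]
    congr 1
    have h := ih (seen ++ [p])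
    simp only [List.append_assoc, List.cons_append, List.nil_append] at h ⊢
    exact h

theorem pvFindPms_cons (fuel : Nat) (f : Int) (rest : List Int) (cur : List (Int × Int)) :
    pvFindPms (fuel + 1) (f :: rest) cur
      = (picksI [] rest).flatMap (fun x => pvFindPms fuel x.1.2 (cur ++ [(f, x.1.1)])) := by
  rw [← rangeFlat (fun p nr => pvFindPms fuel nr (cur ++ [(f, p)])) rest []]
  simp only [pvFindPms]
  rw [PySem.List.pyRange_one, List.flatMap_map]
  rw [show ((((f :: rest).length : Int)) - 1).toNat = rest.length by simp]
  apply List.flatMap_congr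
  intro j hj
  have hjlt : j < rest.length := List.mem_range.mp hj
  have e1 : (1 + (j : Int)) = ((j + 1 : Nat) : Int) := by push_cast; ring
  have egd : PySem.List.pyGetD (f :: rest) (1 + (j : Int)) 0 = rest.getD j 0 := by
    rw [e1, PySem.List.pyGetD_natCast]; simp
  have es1 : PySem.List.slice (f :: rest) (some 1) (some (1 + (j : Int))) = rest.take j := by
    rw [e1, show (1 : Int) = ((1 : Nat) : Int) from rfl, PySem.List.slice_natCast]
    simp
  have es2 : PySem.List.slice (f :: rest) (some (1 + (j : Int) + 1))
      (some ((f :: rest).length : Int)) = rest.drop (j + 1) := by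
    rw [show (1 + (j : Int) + 1) = ((j + 2 : Nat) : Int) by push_cast; ring,
        PySem.List.slice_natCast]
    rw [show (j + 2) = (j + 1) + 1 from rfl, List.drop_succ_cons]
    rw [show (f :: rest).length - (j + 1 + 1) = rest.length - (j + 1) by
      simp only [List.length_cons]; omega]
    exact List.take_of_length_le (by simp)
  rw [egd, es1, es2]
  simp

theorem pvForLoop_picksI (M : List (List Int)) (fuel : Nat) (f : Int) :
    ∀ (todo seen : List Int) (edges : List (Int × Int)) (w s : Int),
      pvForLoop M (pvGo M fuel) f seen todo edges w s ((-1) ^ seen.length)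
        = (picksI seen todo).flatMap (fun x =>
            pvGo M fuel x.1.2 (edges ++ [(f, x.1.1)])
              (w * (pvIdx2 M f x.1.1 - pvIdx2 M x.1.1 f)) (s * (-1) ^ x.2)) := by
  intro todo
  induction todo with
  | nil => intro seen edges w s; simp [pvForLoop, picksI]
  | cons p t ih =>
    intro seen edges w s
    rw [pvForLoop, picksI]
    simp only [List.flatMap_cons]
    congr 1
    rw [show -((-1 : Int) ^ seen.length) = (-1) ^ (seen ++ [p]).length by
      rw [List.length_append]; simp [pow_succ]]
    exact ih (seen ++ [p]) edges w s

theorem picksI_perm :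
    ∀ (todo seen : List Int) (x : (Int × List Int) × Nat),
      x ∈ picksI seen todo → (x.1.1 :: x.1.2).Perm (seen ++ todo) := by
  intro todo
  induction todo with
  | nil => intro seen x hx; simp [picksI] at hx
  | cons p t ih =>
    intro seen x hx
    simp only [picksI, List.mem_cons] at hx
    rcases hx with rfl | hx
    · exact List.perm_middle.symm
    · have h := ih (seen ++ [p]) x hx
      simpa [List.append_assoc] using h

theorem picksI_count :
    ∀ (todo seen : List Int), (seen ++ todo).Pairwise (· < ·) →
      ∀ x ∈ picksI seen todo,
        x.1.2.countP (fun y => decide (y < x.1.1)) = x.2 ∧ x.1.2.Pairwise (· < ·) := by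
  intro todo
  induction todo with
  | nil => intro seen _ x hx; simp [picksI] at hx
  | cons p t ih =>
    intro seen h x hx
    obtain ⟨hseen, hrest, hcross⟩ := List.pairwise_append.mp h
    obtain ⟨hpt, hptail⟩ := List.pairwise_cons.mp hrest
    simp only [picksI, List.mem_cons] at hx
    rcases hx with rfl | hx
    · refine ⟨?_, ?_⟩
      · show (seen ++ t).countP (fun y => decide (y < p)) = seen.length
        rw [List.countP_append]
        have c1 : List.countP (fun y => decide (y < p)) seen = seen.length :=
          List.countP_eq_length.mpr (by
            intro a ha
            simpa using hcross a ha p (List.mem_cons_self))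
        have c2 : List.countP (fun y => decide (y < p)) t = 0 :=
          List.countP_eq_zero.mpr (by
            intro a ha
            have := hpt a ha
            simp; omega)
        rw [c1, c2]
        omega
      · exact List.Pairwise.sublist
          ((List.sublist_cons_self p t).append_left seen) h
    · have hpair' : ((seen ++ [p]) ++ t).Pairwise (· < ·) := by
        simpa [List.append_assoc] using h
      exact ih (seen ++ [p]) hpair' x hx

theorem mapGetD : ∀ l : List Int, (List.range l.length).map (fun k => l.getD k 0) = l := by
  intro l
  induction l with
  | nil => simp
  | cons x l ih =>
    rw [List.length_cons, List.range_succ_eq_map, List.map_cons, List.map_map]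
    rw [show ((fun k => (x :: l).getD k 0) ∘ Nat.succ) = (fun k => l.getD k 0) from rfl]
    rw [ih, List.getD_cons_zero]

theorem foldl_add_nat {β : Type} (l : List β) (g : β → Nat) :
    ∀ a : Nat, l.foldl (fun acc x => acc + g x) a = a + (l.map g).sum := by
  induction l with
  | nil => intro a; simp
  | cons x l ih => intro a; simp only [List.foldl_cons, List.map_cons, List.sum_cons, ih]; omega

theorem innerCount (x : Int) (l : List Int) (j : Nat) :
    ((List.range' (j + 1 + 1) ((x :: l).length - (j + 1 + 1))).filter
      (fun b2 => decide ((x :: l).getD b2 0 < (x :: l).getD (j + 1) 0))).length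
    = ((List.range' (j + 1) (l.length - (j + 1))).filter
      (fun b2 => decide (l.getD b2 0 < l.getD j 0))).length := by
  rw [show (x :: l).length - (j + 1 + 1) = l.length - (j + 1) by
    simp only [List.length_cons]; omega]
  rw [List.range'_succ_left, List.filter_map, List.length_map]
  congr 1

theorem headCount (x : Int) (l : List Int) :
    ((List.range' (0 + 1) ((x :: l).length - (0 + 1))).filter
      (fun b2 => decide ((x :: l).getD b2 0 < (x :: l).getD 0 0))).length
    = l.countP (fun y => decide (y < x)) := by
  rw [show (x :: l).length - (0 + 1) = l.length by simp]
  rw [List.range'_succ_left, List.filter_map, List.length_map,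
      ← List.countP_eq_length_filter, ← List.range_eq_range']
  conv_rhs => rw [← mapGetD l]
  rw [List.countP_map]
  apply List.countP_congr
  intro k _
  simp [Function.comp]

theorem countPairs : ∀ l : List Int,
    ((List.range l.length).map (fun a2 =>
      ((List.range' (a2 + 1) (l.length - (a2 + 1))).filter
        (fun b2 => decide (l.getD b2 0 < l.getD a2 0))).length)).sum = invList l := by
  intro l
  induction l with
  | nil => simp [invList]
  | cons x l ih =>
    rw [List.length_cons, List.range_succ_eq_map, List.map_cons, List.sum_cons, List.map_map]
    rw [invList]
    congr 1
    · exact headCount x l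
    · rw [← ih]
      apply congrArg
      apply List.map_congr_left
      intro j _
      simpa [Function.comp_def, Nat.succ_eq_add_one] using innerCount x l j

theorem inv_bridge (l : List Int) :
    (List.range l.length).foldl (fun acc a2 =>
      acc + ((List.range' (a2 + 1) (l.length - (a2 + 1))).filter
        (fun b2 => decide (l.getD b2 0 < l.getD a2 0))).length) 0 = invList l := by
  rw [foldl_add_nat, countPairs]
  omega

theorem pvScore_eq (S : List (List Int)) (pm : List (Int × Int)) :
    pvScore S pm =
      (pm, pm.foldl (fun acc e => acc * pvIdx2 S e.1 e.2) 1,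
        ((-1 : Int)) ^ invList (permFlat pm),
        ((-1 : Int)) ^ invList (permFlat pm) *
          pm.foldl (fun acc e => acc * pvIdx2 S e.1 e.2) 1) := by
  have hperm : pm.foldl (fun acc e => acc ++ [e.1, e.2]) ([] : List Int) = permFlat pm := by
    simpa [permFlat] using PySem.List.foldl_append_eq_flatMap (fun e : Int × Int => [e.1, e.2]) pm []
  simp only [pvScore, hperm, inv_bridge]

theorem perm_pvFindPms :
    ∀ (fuel : Nat) (rem : List Int), rem.length < fuel →
      ∀ m ∈ pvFindPms fuel rem [], (permFlat m).Perm rem := by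
  intro fuel
  induction fuel with
  | zero => intro rem h; omega
  | succ fuel ih =>
    intro rem hlen m hm
    cases rem with
    | nil =>
      simp only [pvFindPms, List.mem_singleton] at hm
      subst hm; simp [permFlat]
    | cons f rest =>
      rw [pvFindPms_cons] at hm
      obtain ⟨x, hx, hm'⟩ := List.mem_flatMap.mp hm
      rw [pvFindPms_prefix] at hm'
      obtain ⟨m', hm'', rfl⟩ := List.mem_map.mp hm'
      have hperm : (x.1.1 :: x.1.2).Perm rest := by
        simpa using picksI_perm rest [] x hx
      have hnrlen : x.1.2.length + 1 = rest.length := by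
        simpa using hperm.length_eq
      have hfuel : x.1.2.length < fuel := by
        simp only [List.length_cons] at hlen; omega
      have hmp := ih x.1.2 hfuel m' hm''
      have : permFlat (([] ++ [(f, x.1.1)]) ++ m') = f :: x.1.1 :: permFlat m' := by
        simp [permFlat]
      rw [this]
      exact ((hmp.cons x.1.1).trans hperm).cons f

theorem foldl_mul_init (g : Int × Int → Int) :
    ∀ (l : List (Int × Int)) (a : Int),
      l.foldl (fun acc e => acc * g e) a = a * l.foldl (fun acc e => acc * g e) 1 := by
  intro l
  induction l with
  | nil => intro a; simp
  | cons e l ih =>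
    intro a
    simp only [List.foldl_cons]
    rw [ih, ih (1 * g e)]
    ring

theorem pvMain (S M : List (List Int)) :
    ∀ (fuel : Nat) (rem : List Int) (edges : List (Int × Int)) (w s : Int),
      rem.length < fuel → rem.Pairwise (· < ·) →
      (∀ i ∈ rem, ∀ j ∈ rem, pvIdx2 S i j = pvIdx2 M i j - pvIdx2 M j i) →
      (pvFindPms fuel rem []).map (fun m => pvShift edges w s (pvScore S m))
        = pvGo M fuel rem edges w s := by
  intro fuel
  induction fuel with
  | zero => intro rem _ _ _ h; omega
  | succ fuel ih =>
    intro rem edges w s hlen hpw hW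
    cases rem with
    | nil =>
      simp [pvFindPms, pvGo, pvScore_eq, permFlat, invList, pvShift]
    | cons f rest =>
      have hGo : pvGo M (fuel + 1) (f :: rest) edges w s
          = pvForLoop M (pvGo M fuel) f [] rest edges w s 1 := by
        rw [pvGo]
      have hfor := pvForLoop_picksI M fuel f rest [] edges w s
      simp only [List.length_nil, pow_zero] at hfor
      rw [pvFindPms_cons, hGo, hfor, List.map_flatMap]
      apply List.flatMap_congr
      rintro ⟨⟨p, nr⟩, idx⟩ hx
      obtain ⟨hf_lt, hrest_pw⟩ := List.pairwise_cons.mp hpw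
      have hperm : (p :: nr).Perm rest := by
        simpa using picksI_perm rest [] ⟨⟨p, nr⟩, idx⟩ hx
      have hcnt := picksI_count rest [] (by simpa using hrest_pw) ⟨⟨p, nr⟩, idx⟩ hx
      have hnrlen : nr.length + 1 = rest.length := by simpa using hperm.length_eq
      have hfuel2 : nr.length < fuel := by
        simp only [List.length_cons] at hlen; omega
      have hmem : ∀ y ∈ nr, y ∈ rest := fun y hy =>
        hperm.subset (List.mem_cons_of_mem p hy)
      have hpmem : p ∈ rest := hperm.subset List.mem_cons_self
      have hW' : ∀ i ∈ nr, ∀ j ∈ nr, pvIdx2 S i j = pvIdx2 M i j - pvIdx2 M j i :=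
        fun i hi j hj =>
          hW i (List.mem_cons_of_mem f (hmem i hi)) j (List.mem_cons_of_mem f (hmem j hj))
      rw [pvFindPms_prefix, List.map_map]
      rw [← ih nr (edges ++ [(f, p)]) (w * (pvIdx2 M f p - pvIdx2 M p f))
        (s * (-1) ^ idx) hfuel2 hcnt.2 hW']
      apply List.map_congr_left
      intro m hm
      have hmp : (permFlat m).Perm nr := perm_pvFindPms fuel nr hfuel2 m hm
      show pvShift edges w s (pvScore S (([] ++ [(f, p)]) ++ m))
        = pvShift (edges ++ [(f, p)]) (w * (pvIdx2 M f p - pvIdx2 M p f))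
            (s * (-1) ^ idx) (pvScore S m)
      have hW1 : pvIdx2 S f p = pvIdx2 M f p - pvIdx2 M p f :=
        hW f List.mem_cons_self p (List.mem_cons_of_mem f hpmem)
      simp only [List.nil_append, List.singleton_append]
      rw [pvScore_eq, pvScore_eq]
      have hflat : permFlat ((f, p) :: m) = f :: p :: permFlat m := by simp [permFlat]
      have hw : ((f, p) :: m).foldl (fun acc e => acc * pvIdx2 S e.1 e.2) 1
          = (pvIdx2 M f p - pvIdx2 M p f) * m.foldl (fun acc e => acc * pvIdx2 S e.1 e.2) 1 := by
        rw [List.foldl_cons, foldl_mul_init _ m (1 * pvIdx2 S f p), hW1]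
        ring
      have hinv : invList (f :: p :: permFlat m) = idx + invList (permFlat m) := by
        simp only [invList]
        have h0 : (p :: permFlat m).countP (fun y => decide (y < f)) = 0 :=
          List.countP_eq_zero.mpr (by
            intro y hy
            have hyr : y ∈ rest := by
              rcases List.mem_cons.mp hy with rfl | hy'
              · exact hpmem
              · exact hmem y (hmp.subset hy')
            have := hf_lt y hyr
            simp; omega)
        have h1 : (permFlat m).countP (fun y => decide (y < p)) = idx := by
          rw [hmp.countP_eq]; exact hcnt.1
        rw [h0, h1]
        omega
      simp only [pvShift, hflat, hinv, hw]
      refine Prod.ext ?_ (Prod.ext ?_ (Prod.ext ?_ ?_))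
      · simp only []
        rw [List.append_cons]
      · simp only []
        ring
      · simp only []
        rw [pow_add]; ring
      · simp only []
        rw [pow_add]; ring

-- ===== VERDICT (by name: the statement is the Claim_ definition above) =====
theorem enumerate_perfect_matchings_spec : Claim_equal_enumerate_perfect_matchings := by
  intro A n v_del _ _
  unfold Spec_enumerate_perfect_matchings
  simp only [enumerate_perfect_matchings, enumerate_perfect_matchings_alt]
  have hV : ∀ V : List Int, V.Pairwise (· < ·) → (∀ i ∈ V, 0 ≤ i ∧ i < n) →
      (if V.length % 2 = 1 then ([] : List ((List (Int × Int)) × Int × Int × Int))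
       else (pvFindPms (V.length + 1) V []).map
         (pvScore ((PySem.List.pyRange 0 n 1).map (fun i =>
           (PySem.List.pyRange 0 n 1).map (fun j => pvIdx2 A i j - pvIdx2 A j i)))))
      = (if V.length % 2 = 1 then [] else pvGo A (V.length + 1) V [] 1 1) := by
    intro V hpw hbd
    by_cases h : V.length % 2 = 1
    · simp [h]
    · simp only [h, if_false]
      have hW : ∀ i ∈ V, ∀ j ∈ V,
          pvIdx2 ((PySem.List.pyRange 0 n 1).map (fun i =>
            (PySem.List.pyRange 0 n 1).map (fun j => pvIdx2 A i j - pvIdx2 A j i))) i j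
          = pvIdx2 A i j - pvIdx2 A j i := by
        intro i hi j hj
        obtain ⟨hi0, hin⟩ := hbd i hi
        obtain ⟨hj0, hjn⟩ := hbd j hj
        show PySem.List.pyGetD (PySem.List.pyGetD ((PySem.List.pyRange 0 n 1).map
          (fun i => (PySem.List.pyRange 0 n 1).map
            (fun j => pvIdx2 A i j - pvIdx2 A j i))) i []) j 0 = _
        rw [PySem.List.pyGetD_map_pyRange_of_nonneg _ n i [] hi0 hin,
            PySem.List.pyGetD_map_pyRange_of_nonneg _ n j 0 hj0 hjn]
      have hmain := pvMain _ A (V.length + 1) V [] 1 1 (Nat.lt_succ_self _) hpw hW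
      rw [← hmain]
      apply List.map_congr_left
      intro m _
      rw [pvScore_eq]
      simp [pvShift]
    
  cases v_del with
  | none =>
    exact hV (PySem.List.pyRange 0 n 1) (PySem.List.pairwise_lt_pyRange_one 0 n)
      (fun i hi => PySem.List.mem_pyRange_one.mp hi)
  | some v =>
    exact hV _ (List.Pairwise.filter _ (PySem.List.pairwise_lt_pyRange_one 0 n))
      (fun i hi => PySem.List.mem_pyRange_one.mp (List.mem_of_mem_filter hi))
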